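-- pv_equiv track=rewrite | github.com/AriFal2311/EncriptadorProyectFal | Cifradores/cifradorCesar.py | custom_cipher
-- ===== SOURCE A (Python) =====
-- def custom_cipher(message, keys, direction=1):
--
--     final_message = ''
--     used_indices = set()
--
--     # Start at the first character
--     current_index = 0
--
--     alphabet_length = len(message)
--
--     while len(final_message) < alphabet_length:
--         for key in keys:
--             """if key[1]== -1:
--                 direction = -1
--             else:
--                 direction = 1"""
--             count = 0
--             # while count <= key:
--             while count < key:
--                 current_index = (current_index + direction) % alphabet_length
--                 if current_index not in used_indices:
--                     count += 1
--
--             while current_index in used_indices: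
--                 current_index = (current_index + direction) % alphabet_length
--
--             final_message += message[current_index]
--             used_indices.add(current_index)
--             if len(final_message) == alphabet_length:
--                 break
--
--
--     return final_message
-- ===== SOURCE B (Python) =====
-- def custom_cipher(message, keys, direction=1):
--     n = len(message)
--     if n == 0:
--         return ''
--     d = direction % n
--     rem = list(range(n))   # unused traversal coordinates, ascending
--     p = 0                  # index in rem of first unused at-or-after current position
--     first = True           # current position itself still unused (only before 1st pick)
--     out = []
--     while rem:
--         for k in keys:
--             m = len(rem)
--             j = (p + (k if first else k - 1)) % m if k >= 1 else p
--             t = rem.pop(j)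
--             out.append(message[(t * d) % n])
--             first = False
--             m -= 1
--             p = j % m if m else 0
--             if not rem:
--                 break
--     return ''.join(out)
-- ===== Notes on version B (the rewrite author's own statement) =====
-- stated objective: faster
-- what changed: A walks the cycle index-by-index counting unused positions for every key (and rescans used ones); B transforms once into traversal coordinates, keeps the unused coordinates as a sorted list with a position pointer, and selects each key's element by direct modular index arithmetic plus one pop, so the per-key cost no longer depends on the key's magnitude.
import Mathlib
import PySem

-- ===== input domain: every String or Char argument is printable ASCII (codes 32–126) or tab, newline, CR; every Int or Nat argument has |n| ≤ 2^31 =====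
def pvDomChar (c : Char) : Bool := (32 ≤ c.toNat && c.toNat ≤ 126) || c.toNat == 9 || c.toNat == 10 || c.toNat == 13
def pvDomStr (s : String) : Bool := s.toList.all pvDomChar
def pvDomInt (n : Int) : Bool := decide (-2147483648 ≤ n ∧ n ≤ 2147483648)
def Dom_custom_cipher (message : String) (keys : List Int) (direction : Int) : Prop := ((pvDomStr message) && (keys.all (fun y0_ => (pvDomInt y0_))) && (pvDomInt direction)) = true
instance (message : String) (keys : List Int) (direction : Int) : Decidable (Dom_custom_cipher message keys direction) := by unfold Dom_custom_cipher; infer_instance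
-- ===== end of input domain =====

-- B replaces A's step-by-step scanning of used indices (O(n·Σ|key|)) by order-statistic
-- selection on the sorted list of still-unused traversal coordinates (objective: faster).
-- The equivalence claimed is about the RETURN value (neither version mutates its arguments).

-- ===== PORT A =====
-- 'while count < key: current_index = (current_index+direction) % n; if unused: count += 1'
-- (fuel-counted; none = fuel exhausted, which Pre_ rules out)
def aCnt (n dir key : Int) (used : PySem.Set Int) : Nat → Int → Int → Option Int
  | 0, _, _ => none
  | fuel+1, count, cur =>
    if count < key then
      aCnt n dir key used fuel
        (if PySem.Set.contains used (PySem.Int.mod (cur + dir) n) then count else count + 1)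
        (PySem.Int.mod (cur + dir) n)
    else some cur

-- 'while current_index in used_indices: current_index = (current_index+direction) % n'
def aSkp (n dir : Int) (used : PySem.Set Int) : Nat → Int → Option Int
  | 0, _ => none
  | fuel+1, cur =>
    if PySem.Set.contains used cur then aSkp n dir used fuel (PySem.Int.mod (cur + dir) n)
    else some cur

-- body of 'for key in keys': the two whiles, then append message[current_index], mark used
def aKey (msg : List Char) (n dir key : Int) :
    List Char × PySem.Set Int × Int → List Char × PySem.Set Int × Int :=
  fun st =>
    let c1 := (aCnt n dir key st.2.1 (key.toNat * n.toNat + n.toNat + 1) 0 st.2.2).getD st.2.2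
    let c2 := (aSkp n dir st.2.1 (n.toNat + 1) c1).getD c1
    (st.1 ++ [(PySem.List.pyGet? msg c2).getD ' '], PySem.Set.add st.2.1 c2, c2)

-- 'for key in keys: … ; if len(final_message) == alphabet_length: break'
def aFor (msg : List Char) (n dir : Int) :
    List Int → List Char × PySem.Set Int × Int → List Char × PySem.Set Int × Int
  | [], st => st
  | key :: ks, st =>
    let st' := aKey msg n dir key st
    if (st'.1.length : Int) = n then st' else aFor msg n dir ks st'

-- 'while len(final_message) < alphabet_length:' (fuel-counted)
def aOut (msg : List Char) (n dir : Int) (keys : List Int) :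
    Nat → List Char × PySem.Set Int × Int → List Char × PySem.Set Int × Int
  | 0, st => st
  | fuel+1, st =>
    if (st.1.length : Int) < n then aOut msg n dir keys fuel (aFor msg n dir keys st) else st

def custom_cipher (message : String) (keys : List Int) (direction : Int) : String :=
  let msg := message.toList
  let n : Int := (msg.length : Int)
  String.ofList (aOut msg n direction keys (msg.length + 1) ([], PySem.Set.empty, 0)).1

-- ===== PORT B =====
-- 'for k in keys: m=len(rem); j = (p + (k if first else k-1)) % m if k >= 1 else p;
--  t = rem.pop(j); out.append(message[(t*d) % n]); first=False; m-=1; p = j % m if m else 0;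
--  if not rem: break'
def bFor (msg : List Char) (n d : Int) :
    List Int → List Int × Int × Bool × List Char → List Int × Int × Bool × List Char
  | [], st => st
  | k :: ks, (rem, p, first, out) =>
    let m : Int := (rem.length : Int)
    let j : Int := if 1 ≤ k then PySem.Int.mod (p + (if first then k else k - 1)) m else p
    match PySem.List.pop? rem j with
    | none => (rem, p, first, out)   -- unreachable: j is always a valid index of the nonempty rem
    | some (t, rem') =>
      let out' := out ++ [(PySem.List.pyGet? msg (PySem.Int.mod (t * d) n)).getD ' ']
      let p' : Int := if m - 1 ≠ 0 then PySem.Int.mod j (m - 1) else 0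
      if rem' = [] then (rem', p', false, out') else bFor msg n d ks (rem', p', false, out')

-- 'while rem:' (fuel-counted; each pass through nonempty keys pops at least one element)
def bOut (msg : List Char) (n d : Int) (keys : List Int) :
    Nat → List Int × Int × Bool × List Char → List Int × Int × Bool × List Char
  | 0, st => st
  | fuel+1, st => if st.1 ≠ [] then bOut msg n d keys fuel (bFor msg n d keys st) else st

def custom_cipher_alt (message : String) (keys : List Int) (direction : Int) : String :=
  let msg := message.toList
  let n : Int := (msg.length : Int)
  if n = 0 then "" else
    let d : Int := PySem.Int.mod direction n
    String.ofList (bOut msg n d keys (msg.length + 1) (PySem.List.pyRange 0 n 1, 0, true, [])).2.2.2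

-- ===== PRECONDITION & SPEC =====
-- Pre_ excludes exactly the inputs on which Python A loops forever: a nonempty message with
-- an empty key list, or a step 'direction' not coprime with len(message) (then the walk can
-- only ever reach len/gcd positions and the inner whiles eventually cycle among used ones).
def Pre_custom_cipher (message : String) (keys : List Int) (direction : Int) : Prop :=
  message.length = 0 ∨ (keys ≠ [] ∧ Int.gcd direction (message.length : Int) = 1)
instance (message : String) (keys : List Int) (direction : Int) : Decidable (Pre_custom_cipher message keys direction) := by unfold Pre_custom_cipher; infer_instance

def pvWitness_custom_cipher : String × List Int × Int := ("abcde", ([2, 0, -1, 7], 3))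

def Spec_custom_cipher (message : String) (keys : List Int) (direction : Int) (out : String) : Prop := out = custom_cipher_alt message keys direction
instance (message : String) (keys : List Int) (direction : Int) (out : String) : Decidable (Spec_custom_cipher message keys direction out) := by unfold Spec_custom_cipher; infer_instance

-- ===== CLAIM (what is proved, stated in full; the proofs are below) =====
def Claim_equal_custom_cipher : Prop := ∀ (message : String) (keys : List Int) (direction : Int), Dom_custom_cipher message keys direction → Pre_custom_cipher message keys direction → Spec_custom_cipher message keys direction (custom_cipher message keys direction)

-- ===== LEMMAS AND PROOFS =====

structure PvC where
  N : Nat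
  dir : Int
  rem : List Int
  used : PySem.Set Int

def PvC.n (C : PvC) : Int := (C.N : Int)
def PvC.d (C : PvC) : Int := C.dir % C.n
def PvC.idx (C : PvC) (t : Int) : Int := t * C.d % C.n
def PvC.m (C : PvC) : Nat := C.rem.length
def PvC.cLe (C : PvC) (t : Int) : Nat := C.rem.countP (fun r => decide (r ≤ t))
def PvC.cLt (C : PvC) (t : Int) : Nat := C.rem.countP (fun r => decide (r < t))
def PvC.fsa (C : PvC) (t : Int) : Int := C.rem.getD (C.cLe t % C.m) 0
def PvC.sel (C : PvC) : Nat → Int → Int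
  | 0, t => t
  | kk+1, t => C.sel kk (C.fsa t)

structure PvI (C : PvC) : Prop where
  hN : 0 < C.N
  hcop : Int.gcd C.dir C.n = 1
  hsort : C.rem.Pairwise (· < ·)
  hbnd : ∀ t ∈ C.rem, 0 ≤ t ∧ t < C.n
  hused : ∀ t : Int, 0 ≤ t → t < C.n →
    (PySem.Set.contains C.used (C.idx t) = true ↔ t ∉ C.rem)

lemma pv_mod_emod (a b : Int) (h : 0 < b) : PySem.Int.mod a b = a % b :=
  PySem.Int.mod_eq_emod_of_pos h

lemma pv_n_pos (C : PvC) (hN : 0 < C.N) : (0:Int) < C.n := by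
  unfold PvC.n; exact_mod_cast hN

lemma pv_idx_step (C : PvC) (t : Int) :
    (C.idx t + C.dir) % C.n = C.idx ((t + 1) % C.n) := by
  unfold PvC.idx PvC.d
  calc (t * (C.dir % C.n) % C.n + C.dir) % C.n
      = (t * (C.dir % C.n) + C.dir) % C.n := Int.emod_add_emod ..
    _ = (t * (C.dir % C.n) + C.dir % C.n) % C.n := (Int.add_emod_emod ..).symm
    _ = ((t + 1) * (C.dir % C.n)) % C.n := by ring_nf
    _ = ((t + 1) % C.n * ((C.dir % C.n) % C.n)) % C.n := Int.mul_emod ..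
    _ = ((t + 1) % C.n * (C.dir % C.n)) % C.n := by rw [Int.emod_emod_of_dvd _ dvd_rfl]

lemma pv_shift (Cn t j : Int) :
    ((t + 1) % Cn + j) % Cn = (t + (j + 1)) % Cn := by
  calc ((t + 1) % Cn + j) % Cn = ((t + 1) + j) % Cn := Int.emod_add_emod ..
    _ = (t + (j + 1)) % Cn := by ring_nf

lemma pv_idx_inj (C : PvC) (I : PvI C) {t u : Int}
    (ht0 : 0 ≤ t) (ht1 : t < C.n) (hu0 : 0 ≤ u) (hu1 : u < C.n)
    (h : C.idx t = C.idx u) : t = u := by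
  have hn := pv_n_pos C I.hN
  have hd : C.d ≡ C.dir [ZMOD C.n] := Int.emod_emod_of_dvd _ dvd_rfl
  have h1 : t * C.dir ≡ u * C.dir [ZMOD C.n] := by
    calc t * C.dir ≡ t * C.d [ZMOD C.n] := (hd.mul_left t).symm
      _ ≡ u * C.d [ZMOD C.n] := h
      _ ≡ u * C.dir [ZMOD C.n] := hd.mul_left u
  have h2 := Int.ModEq.cancel_right_div_gcd hn h1
  rw [Int.gcd_comm, I.hcop] at h2
  simp only [Nat.cast_one, Int.ediv_one] at h2
  have h3 : t % C.n = u % C.n := h2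
  rwa [Int.emod_eq_of_lt ht0 ht1, Int.emod_eq_of_lt hu0 hu1] at h3

-- sorted prefix counting
lemma pv_sorted_countP (l : List Int) (hs : l.Pairwise (· < ·)) (p : Int → Bool)
    (hmono : ∀ a b : Int, a < b → p b = true → p a = true) :
    ∀ i (hi : i < l.length), p l[i] = true ↔ i < l.countP p := by
  induction l with
  | nil => intro i hi; simp at hi
  | cons x xs ih =>
    have hx : ∀ y ∈ xs, x < y := fun y hy => (List.pairwise_cons.1 hs).1 y hy
    have hs' := (List.pairwise_cons.1 hs).2
    intro i hi
    cases hpx : p x with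
    | true =>
      rw [List.countP_cons_of_pos (p := p) hpx]
      cases i with
      | zero => simpa using hpx
      | succ i' =>
        simp only [List.getElem_cons_succ]
        rw [ih hs' i' (by simpa using hi)]
        omega
    | false =>
      have : (x :: xs).countP p = 0 := by
        rw [List.countP_cons_of_neg (p := p) (by simp [hpx])]
        rw [List.countP_eq_zero]
        intro y hy
        cases hpy : p y with
        | true => exact absurd (hmono x y (hx y hy) hpy) (by simp [hpx])
        | false => simp
      rw [this]
      simp only [Nat.not_lt_zero, iff_false]
      cases i with
      | zero => simpa using hpx
      | succ i' =>
        simp only [List.getElem_cons_succ]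
        intro hpy
        exact absurd (hmono x _ (hx _ (List.getElem_mem _)) hpy) (by simp [hpx])

lemma pv_prefix_le (C : PvC) (I : PvI C) (t : Int) :
    ∀ i (hi : i < C.m), C.rem[i] ≤ t ↔ i < C.cLe t := by
  intro i hi
  have := pv_sorted_countP C.rem I.hsort (fun r => decide (r ≤ t))
    (fun a b hab hb => by simp at hb ⊢; omega) i hi
  simpa using this

lemma pv_prefix_lt (C : PvC) (I : PvI C) (t : Int) :
    ∀ i (hi : i < C.m), C.rem[i] < t ↔ i < C.cLt t := by
  intro i hi
  have := pv_sorted_countP C.rem I.hsort (fun r => decide (r < t))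
    (fun a b hab hb => by simp at hb ⊢; omega) i hi
  simpa using this

lemma pv_cLe_le (C : PvC) (t : Int) : C.cLe t ≤ C.m := List.countP_le_length ..
lemma pv_cLt_le (C : PvC) (t : Int) : C.cLt t ≤ C.m := List.countP_le_length ..

lemma pv_mono (C : PvC) (I : PvI C) {i j : Nat} (hij : i ≤ j) (hj : j < C.m) :
    C.rem[i]'(by exact lt_of_le_of_lt hij hj) ≤ C.rem[j] := by
  rcases Nat.lt_or_ge i j with h | h
  · exact le_of_lt ((List.pairwise_iff_getElem.1 I.hsort) i j _ hj h)
  · have : i = j := le_antisymm hij h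
    subst this; rfl

lemma pv_head_le (C : PvC) (I : PvI C) {y : Int} (hy : y ∈ C.rem) :
    C.rem.getD 0 0 ≤ y := by
  obtain ⟨i, hi, rfl⟩ := List.mem_iff_getElem.1 hy
  have h0 : 0 < C.m := Nat.lt_of_le_of_lt (Nat.zero_le _) hi
  rw [List.getD_eq_getElem _ _ h0]
  exact pv_mono C I (Nat.zero_le _) hi

lemma pv_m_def (C : PvC) : C.m = C.rem.length := rfl

lemma pv_m_pos (C : PvC) (hne : C.rem ≠ []) : 0 < C.m :=
  List.length_pos_iff.2 hne

-- fsa is a member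
lemma pv_fsa_mem (C : PvC) (hne : C.rem ≠ []) (t : Int) : C.fsa t ∈ C.rem := by
  have hm : 0 < C.m := pv_m_pos C hne
  unfold PvC.fsa
  rw [List.getD_eq_getElem _ _ (by exact Nat.mod_lt _ hm)]
  exact List.getElem_mem _

lemma pv_cLe_getElem (C : PvC) (I : PvI C) {i : Nat} (hi : i < C.m) :
    C.cLe (C.rem[i]) = i + 1 := by
  have hq := pv_cLe_le C (C.rem[i])
  by_contra hne
  rcases Nat.lt_or_ge (C.cLe C.rem[i]) (i+1) with h | h
  · -- then ¬ (i < cLe) so ¬ rem[i] ≤ rem[i]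
    have := (pv_prefix_le C I (C.rem[i]) i hi).1 le_rfl
    omega
  · have h2 : i + 1 < C.m ∨ C.cLe C.rem[i] = i + 1 := by omega
    rcases h2 with h2 | h2
    · have := (pv_prefix_le C I (C.rem[i]) (i+1) h2).2 (by omega)
      have hlt := (List.pairwise_iff_getElem.1 I.hsort) i (i+1) hi h2 (by omega)
      omega
    · exact hne h2

lemma pv_cLt_mem (C : PvC) (I : PvI C) {tc : Int} (htc : tc ∈ C.rem) :
    C.cLt tc < C.m ∧ C.rem.getD (C.cLt tc) 0 = tc ∧ C.cLe tc = C.cLt tc + 1 := by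
  obtain ⟨i, hi, rfl⟩ := List.mem_iff_getElem.1 htc
  have hmm := pv_m_def C
  have hcLt : C.cLt (C.rem[i]) = i := by
    have hub : ¬ (i < C.cLt (C.rem[i])) := by
      intro h
      have := (pv_prefix_lt C I (C.rem[i]) i hi).2 h
      exact lt_irrefl _ this
    have hlb : ¬ (C.cLt (C.rem[i]) < i) := by
      intro h
      have hlt := (List.pairwise_iff_getElem.1 I.hsort) (C.cLt (C.rem[i])) i (by omega) hi h
      have := (pv_prefix_lt C I (C.rem[i]) (C.cLt (C.rem[i])) (by have := pv_cLt_le C (C.rem[i]); omega)).1 hlt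
      exact lt_irrefl _ this
    omega
  refine ⟨by omega, ?_, ?_⟩
  · rw [hcLt, List.getD_eq_getElem _ _ (by omega)]
  · rw [hcLt, pv_cLe_getElem C I hi]

lemma pv_cLe_not_mem (C : PvC) {tc : Int} (htc : tc ∉ C.rem) :
    C.cLe tc = C.cLt tc := by
  unfold PvC.cLe PvC.cLt
  apply List.countP_congr
  intro r hr
  have : r ≠ tc := by rintro rfl; exact htc hr
  simp; omega

lemma pv_emod_eq0 (a b n : Int) (h : a = b) (h0 : 0 ≤ b) (h1 : b < n) : a % n = b := by
  subst h; exact Int.emod_eq_of_lt h0 h1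

lemma pv_emod_eq1 (a b n : Int) (h : a = n + b) (h0 : 0 ≤ b) (h1 : b < n) : a % n = b := by
  subst h; rw [Int.add_comm, Int.add_emod_right]
  exact Int.emod_eq_of_lt h0 h1

-- the count/skip walk starting one step after coordinate t first meets the unused
-- set exactly at C.fsa t
lemma pv_stream (C : PvC) (I : PvI C) (hne : C.rem ≠ []) (t : Int) (ht0 : 0 ≤ t) (ht1 : t < C.n) :
    ∃ i0 : Nat, (i0 + 1 ≤ C.N) ∧ ((t + 1 + i0) % C.n = C.fsa t) ∧
      ((t + 1 + i0) % C.n ∈ C.rem) ∧ ∀ j : Nat, j < i0 → ((t + 1 + j) % C.n ∉ C.rem) := by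
  have hmm := pv_m_def C
  have hm := pv_m_pos C hne
  have hn := pv_n_pos C I.hN
  have hNn : C.n = (C.N : Int) := rfl
  rcases Nat.lt_or_ge (C.cLe t) C.m with hq | hq
  · -- some remaining coordinate is > t; the nearest is rem[cLe t]
    set q := C.cLe t with hqdef
    have hrt : t < C.rem[q] := by
      have := (pv_prefix_le C I t q hq)
      by_contra h
      have := this.1 (by omega)
      omega
    have hrb := I.hbnd (C.rem[q]) (List.getElem_mem _)
    have hfsa : C.fsa t = C.rem[q] := by
      unfold PvC.fsa
      rw [Nat.mod_eq_of_lt hq, List.getD_eq_getElem _ _ (by omega)]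
      rfl
    have hval : ∀ i0 : Nat, (i0 : Int) = C.rem[q] - t - 1 → (t + (1:Int) + (i0 : Int)) % C.n = C.rem[q] := by
      intro i0 hi0
      exact pv_emod_eq0 _ _ _ (by omega) (by omega) (by omega)
    refine ⟨(C.rem[q] - t - 1).toNat, by omega, ?_, ?_, ?_⟩
    · rw [hfsa]; exact hval _ (by omega)
    · rw [hval _ (by omega)]; exact List.getElem_mem _
    · intro j hj hmem
      have hv : t + 1 + (j:Int) < C.rem[q] := by omega
      rw [Int.emod_eq_of_lt (by omega) (by omega)] at hmem
      obtain ⟨i, hi, hieq⟩ := List.mem_iff_getElem.1 hmem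
      have hgt : ¬ (C.rem[i] ≤ t) := by omega
      have hge : q ≤ i := by
        have := pv_prefix_le C I t i hi
        omega
      have := pv_mono C I hge hi
      omega
  · -- every remaining coordinate is ≤ t; wrap around to rem[0]
    have hall : ∀ y ∈ C.rem, y ≤ t := by
      intro y hy
      obtain ⟨i, hi, rfl⟩ := List.mem_iff_getElem.1 hy
      exact (pv_prefix_le C I t i hi).2 (by omega)
    have h0m : 0 < C.rem.length := by omega
    have hr0 : C.rem.getD 0 0 = C.rem[0] := List.getD_eq_getElem _ _ h0m
    have hrb := I.hbnd (C.rem[0]) (List.getElem_mem _)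
    have hr0t : C.rem[0] ≤ t := hall _ (List.getElem_mem _)
    have hfsa : C.fsa t = C.rem[0] := by
      unfold PvC.fsa
      have : C.cLe t % C.m = 0 := by
        have := pv_cLe_le C t
        have : C.cLe t = C.m := by omega
        simp [this]
      rw [this, hr0]
    have hval : ∀ i0 : Nat, (i0 : Int) = C.n - (t+1) + C.rem[0] → (t + (1:Int) + (i0 : Int)) % C.n = C.rem[0] := by
      intro i0 hi0
      exact pv_emod_eq1 _ _ _ (by omega) (by omega) (by omega)
    refine ⟨(C.n - (t+1) + C.rem[0]).toNat, by omega, ?_, ?_, ?_⟩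
    · rw [hfsa]; exact hval _ (by omega)
    · rw [hval _ (by omega)]; exact List.getElem_mem _
    · intro j hj hmem
      rcases lt_or_ge (t + 1 + (j:Int)) C.n with hv | hv
      · rw [Int.emod_eq_of_lt (by omega) hv] at hmem
        have := hall _ hmem
        omega
      · have hveq : (t + 1 + (j:Int)) % C.n = t + 1 + (j:Int) - C.n := by
          have h1 : t + 1 + (j:Int) - C.n < C.n := by omega
          have h2 : 0 ≤ t + 1 + (j:Int) - C.n := by omega
          calc (t + 1 + (j:Int)) % C.n = (t + 1 + (j:Int) - C.n) % C.n := by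
                rw [Int.sub_emod_right]
            _ = t + 1 + (j:Int) - C.n := Int.emod_eq_of_lt h2 h1
        rw [hveq] at hmem
        have := pv_head_le C I hmem
        rw [hr0] at this
        omega


-- A's skip loop, started at coordinate t, lands at the first remaining coordinate
lemma pv_skip (C : PvC) (I : PvI C) :
    ∀ (i0 fuel : Nat) (t : Int), 0 ≤ t → t < C.n →
      ((t + (i0:Int)) % C.n ∈ C.rem) → (∀ j : Nat, j < i0 → ((t + (j:Int)) % C.n ∉ C.rem)) →
      i0 < fuel →
      aSkp C.n C.dir C.used fuel (C.idx t) = some (C.idx ((t + (i0:Int)) % C.n)) := by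
  intro i0
  induction i0 with
  | zero =>
    intro fuel t ht0 ht1 hmem _ hfuel
    have ht : (t + ((0:Nat):Int)) % C.n = t := by
      exact pv_emod_eq0 _ _ _ (by omega) ht0 ht1
    rw [ht] at hmem ⊢
    have hc : PySem.Set.contains C.used (C.idx t) = false := by
      have := I.hused t ht0 ht1
      rcases h : PySem.Set.contains C.used (C.idx t) with _ | _
      · rfl
      · exact absurd ((this).1 h) (by simp [hmem])
    cases fuel with
    | zero => omega
    | succ f =>
      rw [aSkp]
      simp only [hc, Bool.false_eq_true, if_false]
  | succ i0 ih =>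
    intro fuel t ht0 ht1 hmem hmin hfuel
    have hn := pv_n_pos C I.hN
    have ht : (t + ((0:Nat):Int)) % C.n = t := pv_emod_eq0 _ _ _ (by omega) ht0 ht1
    have hnotmem : t ∉ C.rem := by
      have := hmin 0 (by omega)
      rwa [ht] at this
    have hc : PySem.Set.contains C.used (C.idx t) = true :=
      (I.hused t ht0 ht1).2 hnotmem
    cases fuel with
    | zero => omega
    | succ f =>
      rw [aSkp]
      simp only [hc, if_true]
      rw [pv_mod_emod _ _ hn, pv_idx_step C t]
      have hb0 : 0 ≤ (t+1) % C.n := Int.emod_nonneg _ (by omega)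
      have hb1 : (t+1) % C.n < C.n := Int.emod_lt_of_pos _ hn
      have hmem' : ((t+1) % C.n + (i0:Int)) % C.n ∈ C.rem := by
        rw [pv_shift]
        have : t + ((i0:Int) + 1) = t + (((i0+1:Nat)):Int) := by push_cast; ring
        rwa [this]
      have hmin' : ∀ j : Nat, j < i0 → (((t+1) % C.n + (j:Int)) % C.n ∉ C.rem) := by
        intro j hj
        rw [pv_shift]
        have : t + ((j:Int) + 1) = t + (((j+1:Nat)):Int) := by push_cast; ring
        rw [this]
        exact hmin (j+1) (by omega)
      have := ih f ((t+1) % C.n) hb0 hb1 hmem' hmin' (by omega)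
      rw [this, pv_shift]
      have : t + ((i0:Int) + 1) = t + (((i0+1:Nat)):Int) := by push_cast; ring
      rw [this]

-- one 'count += 1' hop of A's count loop
lemma pv_cnt_hop (C : PvC) (I : PvI C) (key : Int) :
    ∀ (i0 fuel : Nat) (t count : Int), 0 ≤ t → t < C.n → count < key →
      ((t + 1 + (i0:Int)) % C.n ∈ C.rem) →
      (∀ j : Nat, j < i0 → ((t + 1 + (j:Int)) % C.n ∉ C.rem)) →
      i0 + 1 ≤ fuel →
      aCnt C.n C.dir key C.used fuel count (C.idx t) =
        aCnt C.n C.dir key C.used (fuel - (i0+1)) (count+1) (C.idx ((t + 1 + (i0:Int)) % C.n)) := by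
  intro i0
  induction i0 with
  | zero =>
    intro fuel t count ht0 ht1 hck hmem _ hfuel
    have hn := pv_n_pos C I.hN
    have h10 : t + 1 + ((0:Nat):Int) = t + 1 := by push_cast; ring
    rw [h10] at hmem ⊢
    have hb0 : 0 ≤ (t+1) % C.n := Int.emod_nonneg _ (by omega)
    have hb1 : (t+1) % C.n < C.n := Int.emod_lt_of_pos _ hn
    have hc : PySem.Set.contains C.used (C.idx ((t+1) % C.n)) = false := by
      have := I.hused _ hb0 hb1
      rcases h : PySem.Set.contains C.used (C.idx ((t+1) % C.n)) with _ | _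
      · rfl
      · exact absurd (this.1 h) (by simp [hmem])
    cases fuel with
    | zero => omega
    | succ f =>
      rw [aCnt]
      simp only [hck, if_true]
      rw [pv_mod_emod _ _ hn, pv_idx_step C t, hc]
      simp only [Bool.false_eq_true, if_false, Nat.add_sub_cancel]
  | succ i0 ih =>
    intro fuel t count ht0 ht1 hck hmem hmin hfuel
    have hn := pv_n_pos C I.hN
    have h10 : t + 1 + ((0:Nat):Int) = t + 1 := by push_cast; ring
    have hb0 : 0 ≤ (t+1) % C.n := Int.emod_nonneg _ (by omega)
    have hb1 : (t+1) % C.n < C.n := Int.emod_lt_of_pos _ hn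
    have hnotmem : (t+1) % C.n ∉ C.rem := by
      have := hmin 0 (by omega)
      rwa [h10] at this
    have hc : PySem.Set.contains C.used (C.idx ((t+1) % C.n)) = true :=
      (I.hused _ hb0 hb1).2 hnotmem
    cases fuel with
    | zero => omega
    | succ f =>
      rw [aCnt]
      simp only [hck, if_true]
      rw [pv_mod_emod _ _ hn, pv_idx_step C t, hc]
      simp only [if_true]
      have hshift : ∀ j : Nat, ((t+1) % C.n + 1 + (j:Int)) % C.n = (t + 1 + ((j+1:Nat):Int)) % C.n := by
        intro j
        have h1 : (t+1) % C.n + 1 + (j:Int) = (t+1) % C.n + ((j:Int) + 1) := by ring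
        rw [h1, pv_shift]
        congr 1
        push_cast; ring
      have hmem' : ((t+1) % C.n + 1 + (i0:Int)) % C.n ∈ C.rem := by
        rw [hshift]; exact hmem
      have hmin' : ∀ j : Nat, j < i0 → (((t+1) % C.n + 1 + (j:Int)) % C.n ∉ C.rem) := by
        intro j hj
        rw [hshift]
        exact hmin (j+1) (by omega)
      rw [ih f ((t+1) % C.n) count hb0 hb1 hck hmem' hmin' (by omega)]
      rw [hshift]
      congr 1
      omega

-- A's count loop with key - kk counted so far computes the kk-fold fsa iterate
lemma pv_cnt (C : PvC) (I : PvI C) (hne : C.rem ≠ []) (key : Int) :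
    ∀ (kk : Nat) (fuel : Nat) (t : Int), 0 ≤ t → t < C.n → kk * C.N + 1 ≤ fuel →
      aCnt C.n C.dir key C.used fuel (key - (kk:Int)) (C.idx t) = some (C.idx (C.sel kk t)) := by
  intro kk
  induction kk with
  | zero =>
    intro fuel t ht0 ht1 hfuel
    have h0 : key - ((0:Nat):Int) = key := by push_cast; ring
    rw [h0]
    cases fuel with
    | zero => omega
    | succ f =>
      rw [aCnt]
      simp only [lt_irrefl, if_false]
      rfl
  | succ kk ih =>
    intro fuel t ht0 ht1 hfuel
    have hck : key - ((kk+1:Nat):Int) < key := by push_cast; omega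
    obtain ⟨i0, hbound, hval, hmem, hmin⟩ := pv_stream C I hne t ht0 ht1
    rw [pv_cnt_hop C I key i0 fuel t _ ht0 ht1 hck hmem hmin (by
      have h1 : (kk+1) * C.N = kk * C.N + C.N := Nat.succ_mul ..
      omega)]
    have hstep : key - ((kk+1:Nat):Int) + 1 = key - (kk:Int) := by push_cast; ring
    rw [hstep, hval]
    have hfm := pv_fsa_mem C hne t
    have hfb := I.hbnd _ hfm
    rw [ih (fuel - (i0+1)) (C.fsa t) hfb.1 hfb.2 (by
      have h1 : (kk+1) * C.N = kk * C.N + C.N := Nat.succ_mul ..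
      omega)]
    rfl

-- closed form for the fsa iterate on the sorted remaining list
lemma pv_sel_formula (C : PvC) (I : PvI C) (hne : C.rem ≠ []) :
    ∀ (kk : Nat), 1 ≤ kk → ∀ t : Int,
      C.sel kk t = C.rem.getD ((C.cLe t + kk - 1) % C.m) 0 := by
  have hm := pv_m_pos C hne
  intro kk
  induction kk with
  | zero => omega
  | succ kk ih =>
    intro _ t
    rcases Nat.eq_zero_or_pos kk with h0 | hpos
    · subst h0
      show C.sel 0 (C.fsa t) = _
      unfold PvC.sel PvC.fsa
      simp
    · show C.sel kk (C.fsa t) = _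
      rw [ih hpos (C.fsa t)]
      have hidx : C.cLe t % C.m < C.m := Nat.mod_lt _ hm
      have hfsa_elem : C.fsa t = C.rem[C.cLe t % C.m] := by
        unfold PvC.fsa
        exact List.getD_eq_getElem _ _ hidx
      have hcle : C.cLe (C.fsa t) = C.cLe t % C.m + 1 := by
        rw [hfsa_elem]
        exact pv_cLe_getElem C I hidx
      rw [hcle]
      congr 1
      have h1 : C.cLe t % C.m + 1 + kk - 1 = C.cLe t % C.m + kk := by omega
      have h2 : C.cLe t + (kk + 1) - 1 = C.cLe t + kk := by omega
      rw [h1, h2, Nat.mod_add_mod]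

-- the coordinate A's two inner whiles select for one key
def pvSelCoord (C : PvC) (k t : Int) : Int :=
  if 1 ≤ k then C.rem.getD ((C.cLe t + k.toNat - 1) % C.m) 0
  else if t ∈ C.rem then t else C.rem.getD (C.cLe t % C.m) 0

lemma pv_selCoord_mem (C : PvC) (_I : PvI C) (hne : C.rem ≠ []) (k t : Int) :
    pvSelCoord C k t ∈ C.rem := by
  have hm := pv_m_pos C hne
  have hmd := pv_m_def C
  unfold pvSelCoord
  split_ifs with h1 h2
  · have hlt : (C.cLe t + k.toNat - 1) % C.m < C.rem.length := by
      have := Nat.mod_lt (C.cLe t + k.toNat - 1) hm; omega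
    rw [List.getD_eq_getElem _ _ hlt]
    exact List.getElem_mem _
  · exact h2
  · have hlt : C.cLe t % C.m < C.rem.length := by
      have := Nat.mod_lt (C.cLe t) hm; omega
    rw [List.getD_eq_getElem _ _ hlt]
    exact List.getElem_mem _

-- A's inner pair of whiles (with the fuels the port supplies) lands on pvSelCoord
lemma pv_akey_coord (C : PvC) (I : PvI C) (hne : C.rem ≠ []) (k t : Int)
    (ht0 : 0 ≤ t) (ht1 : t < C.n) :
    (aSkp C.n C.dir C.used (C.n.toNat + 1)
        ((aCnt C.n C.dir k C.used (k.toNat * C.n.toNat + C.n.toNat + 1) 0 (C.idx t)).getD (C.idx t)))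
      = some (C.idx (pvSelCoord C k t)) := by
  have hn := pv_n_pos C I.hN
  have hNn : C.n.toNat = C.N := by unfold PvC.n; simp
  have hm := pv_m_pos C hne
  rcases le_or_gt 1 k with hk | hk
  · -- k ≥ 1: the count loop does k.toNat hops, the skip loop is a no-op
    have hkk : k - (k.toNat : Int) = 0 := by omega
    have hcnt := pv_cnt C I hne k k.toNat (k.toNat * C.n.toNat + C.n.toNat + 1) t ht0 ht1
      (by rw [hNn]; omega)
    rw [hkk] at hcnt
    rw [hcnt]
    simp only [Option.getD_some]
    have hsel : C.sel k.toNat t = pvSelCoord C k t := by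
      rw [pv_sel_formula C I hne k.toNat (by omega) t]
      unfold pvSelCoord
      rw [if_pos hk]
    rw [hsel]
    have hmem : pvSelCoord C k t ∈ C.rem := pv_selCoord_mem C I hne k t
    have hb := I.hbnd _ hmem
    have h0 : (pvSelCoord C k t + ((0:Nat):Int)) % C.n = pvSelCoord C k t :=
      pv_emod_eq0 _ _ _ (by push_cast; ring) hb.1 hb.2
    have := pv_skip C I 0 (C.n.toNat + 1) (pvSelCoord C k t) hb.1 hb.2
      (by rw [h0]; exact hmem) (by omega) (by omega)
    rw [this, h0]
  · -- k ≤ 0: the count loop exits at once, the skip loop finds the first unused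
    have hcnt : aCnt C.n C.dir k C.used (k.toNat * C.n.toNat + C.n.toNat + 1) 0 (C.idx t)
        = some (C.idx t) := by
      have hpos : 0 < k.toNat * C.n.toNat + C.n.toNat + 1 := by omega
      rcases hf : k.toNat * C.n.toNat + C.n.toNat + 1 with _ | f
      · omega
      · rw [aCnt]
        rw [if_neg (by omega)]
    rw [hcnt]
    simp only [Option.getD_some]
    by_cases hmem : t ∈ C.rem
    · have h0 : (t + ((0:Nat):Int)) % C.n = t := pv_emod_eq0 _ _ _ (by push_cast; ring) ht0 ht1
      have := pv_skip C I 0 (C.n.toNat + 1) t ht0 ht1 (by rw [h0]; exact hmem) (by omega) (by omega)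
      rw [this, h0]
      unfold pvSelCoord
      rw [if_neg (by omega), if_pos hmem]
    · obtain ⟨i0, hbound, hval, hsm, hmin⟩ := pv_stream C I hne t ht0 ht1
      have harg : ∀ j : Nat, (t + ((j+1:Nat):Int)) % C.n = (t + 1 + (j:Int)) % C.n := by
        intro j; congr 1; push_cast; ring
      have := pv_skip C I (i0+1) (C.n.toNat + 1) t ht0 ht1
        (by rw [harg i0]; exact hsm)
        (by
          intro j hj
          cases j with
          | zero =>
            have h0 : (t + ((0:Nat):Int)) % C.n = t :=
              pv_emod_eq0 _ _ _ (by push_cast; ring) ht0 ht1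
            rw [h0]; exact hmem
          | succ j' =>
            rw [harg j']
            exact hmin j' (by omega))
        (by rw [hNn]; omega)
      rw [this, harg i0, hval]
      unfold pvSelCoord PvC.fsa
      rw [if_neg (by omega), if_neg hmem]

lemma pv_nodup (C : PvC) (I : PvI C) : C.rem.Nodup :=
  I.hsort.imp (fun h => ne_of_lt h)

lemma pv_erase_mem (C : PvC) (I : PvI C) {j : Nat} (hj : j < C.rem.length) (t : Int) :
    t ∈ C.rem.eraseIdx j ↔ t ∈ C.rem ∧ t ≠ C.rem[j] := by
  rw [← List.Nodup.erase_getElem (pv_nodup C I) j hj]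
  rw [List.Nodup.mem_erase_iff (pv_nodup C I)]
  tauto

lemma pv_erase_countP (C : PvC) (I : PvI C) {j : Nat} (hj : j < C.rem.length) :
    (C.rem.eraseIdx j).countP (fun r => decide (r < C.rem[j])) = j := by
  rw [List.eraseIdx_eq_take_drop_succ, List.countP_append]
  have h1 : (C.rem.take j).countP (fun r => decide (r < C.rem[j])) = j := by
    have hlen : (C.rem.take j).length = j := List.length_take_of_le (by omega)
    rw [List.countP_eq_length.2, hlen]
    intro a ha
    obtain ⟨i, hi, rfl⟩ := List.mem_iff_getElem.1 ha
    rw [List.getElem_take]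
    have : i < j := by omega
    simpa using (List.pairwise_iff_getElem.1 I.hsort) i j (by omega) hj this
  have h2 : (C.rem.drop (j+1)).countP (fun r => decide (r < C.rem[j])) = 0 := by
    rw [List.countP_eq_zero]
    intro a ha
    obtain ⟨i, hi, rfl⟩ := List.mem_iff_getElem.1 ha
    rw [List.getElem_drop]
    have hi' : i < C.rem.length - (j+1) := by simpa using hi
    have := (List.pairwise_iff_getElem.1 I.hsort) j (j+1+i) hj (by omega) (by omega)
    simp
    omega
  omega

lemma pv_intmod_cast (a m : Nat) : ((a:Int)) % ((m:Int)) = ((a % m : Nat) : Int) :=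
  Int.ofNat_mod_ofNat a m

-- B's index formula picks out exactly pvSelCoord in the sorted remaining list
lemma pv_j_eq (C : PvC) (I : PvI C) (hne : C.rem ≠ []) (k tc : Int) (first : Bool)
    (hfirst : first = true ↔ tc ∈ C.rem) :
    ∃ jN : Nat, jN < C.m ∧
      (if 1 ≤ k then PySem.Int.mod ((((C.cLt tc % C.m : Nat)):Int) + (if first then k else k - 1)) ((C.m:Int))
       else (((C.cLt tc % C.m : Nat)):Int)) = (jN : Int) ∧
      C.rem.getD jN 0 = pvSelCoord C k tc := by
  have hm := pv_m_pos C hne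
  have hmd := pv_m_def C
  have hmI : (0:Int) < (C.m : Int) := by exact_mod_cast hm
  rcases le_or_gt 1 k with hk | hk
  · have hkt : k = (k.toNat : Int) := by omega
    rw [if_pos hk]
    rcases hf : first with _ | _
    · -- first = false : tc not remaining, cLe = cLt
      have hnotmem : tc ∉ C.rem := by simp [hf] at hfirst; exact hfirst
      have hcle := pv_cLe_not_mem C hnotmem
      refine ⟨(C.cLt tc + (k.toNat - 1)) % C.m, Nat.mod_lt _ hm, ?_, ?_⟩
      · rw [if_neg (by simp), pv_mod_emod _ _ hmI]
        have harg : ((C.cLt tc % C.m : Nat) : Int) + (k - 1)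
            = ((C.cLt tc % C.m + (k.toNat - 1) : Nat) : Int) := by push_cast; omega
        rw [harg, pv_intmod_cast]
        congr 1
        rw [Nat.mod_add_mod]
      · unfold pvSelCoord
        rw [if_pos hk, hcle]
        congr 2
        omega
    · -- first = true : tc itself is still remaining
      have hmem : tc ∈ C.rem := hfirst.1 hf
      obtain ⟨hclt, -, hcle⟩ := pv_cLt_mem C I hmem
      refine ⟨(C.cLt tc + k.toNat) % C.m, Nat.mod_lt _ hm, ?_, ?_⟩
      · rw [if_pos rfl, pv_mod_emod _ _ hmI]
        have harg : ((C.cLt tc % C.m : Nat) : Int) + k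
            = ((C.cLt tc % C.m + k.toNat : Nat) : Int) := by push_cast; omega
        rw [harg, pv_intmod_cast]
        congr 1
        rw [Nat.mod_add_mod]
      · unfold pvSelCoord
        rw [if_pos hk, hcle]
        congr 2
        omega
  · rw [if_neg (by omega)]
    by_cases hmem : tc ∈ C.rem
    · obtain ⟨hclt, hgetd, -⟩ := pv_cLt_mem C I hmem
      refine ⟨C.cLt tc, hclt, ?_, ?_⟩
      · rw [Nat.mod_eq_of_lt hclt]
      · rw [hgetd]
        unfold pvSelCoord
        rw [if_neg (by omega), if_pos hmem]
    · have hcle := pv_cLe_not_mem C hmem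
      refine ⟨C.cLt tc % C.m, Nat.mod_lt _ hm, rfl, ?_⟩
      unfold pvSelCoord
      rw [if_neg (by omega), if_neg hmem, hcle]
-- relation between A's loop state and B's loop state
def pvRelS (C : PvC) (stA : List Char × PySem.Set Int × Int)
    (stB : List Int × Int × Bool × List Char) : Prop :=
  stA.2.1 = C.used ∧ stB.1 = C.rem ∧ stA.1 = stB.2.2.2 ∧
  C.m + stA.1.length = C.N ∧
  ∃ tc : Int, 0 ≤ tc ∧ tc < C.n ∧ stA.2.2 = C.idx tc ∧
    (stB.2.2.1 = true ↔ tc ∈ C.rem) ∧ stB.2.1 = ((C.cLt tc % C.m : Nat) : Int)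

-- one aligned pass over the key list preserves the relation
lemma pv_for (msg : List Char) : ∀ (keys : List Int) (C : PvC), PvI C → C.rem ≠ [] →
    ∀ stA stB, pvRelS C stA stB →
    ∃ C' : PvC, C'.N = C.N ∧ C'.dir = C.dir ∧ PvI C' ∧
      pvRelS C' (aFor msg C.n C.dir keys stA)
        (bFor msg C.n (PySem.Int.mod C.dir C.n) keys stB) := by
  intro keys
  induction keys with
  | nil => exact fun C I hne stA stB hrel => ⟨C, rfl, rfl, I, hrel⟩
  | cons k ks ih =>
    intro C I hne stA stB hrel
    obtain ⟨fin, used, cur⟩ := stA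
    obtain ⟨rem, p, first, out⟩ := stB
    obtain ⟨hused, hrem, hfo, hlen, tc, htc0, htc1, hcur, hfirst, hp⟩ := hrel
    simp only at hused hrem hfo hlen hcur hfirst hp
    subst hused hrem hfo hcur hp
    have hn := pv_n_pos C I.hN
    have hm := pv_m_pos C hne
    have hmd := pv_m_def C
    obtain ⟨jN, hjm, hjval, hjsel⟩ := pv_j_eq C I hne k tc first hfirst
    have hjlen : jN < C.rem.length := by omega
    have hselmem : pvSelCoord C k tc ∈ C.rem := pv_selCoord_mem C I hne k tc
    have hselb := I.hbnd _ hselmem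
    have hsel_get : C.rem[jN] = pvSelCoord C k tc := by
      rw [← hjsel, List.getD_eq_getElem _ _ hjlen]
    -- A's one-key step
    have hakey : aKey msg C.n C.dir k (fin, C.used, C.idx tc)
        = (fin ++ [(PySem.List.pyGet? msg (C.idx (pvSelCoord C k tc))).getD ' '],
           PySem.Set.add C.used (C.idx (pvSelCoord C k tc)), C.idx (pvSelCoord C k tc)) := by
      unfold aKey
      simp only [pv_akey_coord C I hne k tc htc0 htc1, Option.getD_some]
    -- B's one-key step data
    have hpop : PySem.List.pop? C.rem ((jN:Int)) = some (C.rem[jN], C.rem.eraseIdx jN) :=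
      PySem.List.pop?_natCast C.rem jN hjlen
    -- the new context
    set tc' := C.rem[jN] with htc'
    have htcb : 0 ≤ tc' ∧ tc' < C.n := I.hbnd _ (List.getElem_mem _)
    set C' : PvC := ⟨C.N, C.dir, C.rem.eraseIdx jN, PySem.Set.add C.used (C.idx tc')⟩ with hC'
    have I' : PvI C' := by
      refine ⟨I.hN, I.hcop, ?_, ?_, ?_⟩
      · exact I.hsort.sublist (List.eraseIdx_sublist ..)
      · exact fun t ht => I.hbnd t (List.Sublist.mem ht (List.eraseIdx_sublist ..))
      · intro t ht0 ht1
        show PySem.Set.contains (PySem.Set.add C.used (C.idx tc')) (C.idx t) = true ↔ _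
        rw [PySem.Set.contains_iff _ _, PySem.Set.mem_add]
        show _ ↔ t ∉ C.rem.eraseIdx jN
        rw [pv_erase_mem C I hjlen]
        constructor
        · rintro (h | h)
          · have := (I.hused t ht0 ht1).1 ((PySem.Set.contains_iff _ _).2 h)
            tauto
          · have : t = tc' := pv_idx_inj C I ht0 ht1 htcb.1 htcb.2 h
            tauto
        · intro h
          by_cases hmem : t ∈ C.rem
          · have : t = tc' := by tauto
            exact Or.inr (by rw [this])
          · exact Or.inl ((PySem.Set.contains_iff _ _).1 ((I.hused t ht0 ht1).2 hmem))
    simp only [pv_m_def] at hjval ⊢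
    set chr : Char := (PySem.List.pyGet? msg (C.idx tc')).getD ' ' with hchr
    set stA' : List Char × PySem.Set Int × Int :=
      (fin ++ [chr], PySem.Set.add C.used (C.idx tc'), C.idx tc') with hstA'
    set pE : Int := if ((C.rem.length:Int)) - 1 ≠ 0
        then PySem.Int.mod ((jN:Int)) (((C.rem.length:Int)) - 1) else 0 with hpE
    set stB' : List Int × Int × Bool × List Char :=
      (C.rem.eraseIdx jN, pE, false, fin ++ [chr]) with hstB'
    have hchr_b : (PySem.List.pyGet? msg
        (PySem.Int.mod (tc' * PySem.Int.mod C.dir C.n) C.n)).getD ' ' = chr := by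
      rw [pv_mod_emod _ _ hn, pv_mod_emod _ _ hn]
      rfl
    have hA : aFor msg C.n C.dir (k :: ks) (fin, C.used, C.idx tc)
        = if ((fin.length + 1 : Nat) : Int) = C.n then stA' else aFor msg C.n C.dir ks stA' := by
      rw [aFor, hakey, ← hsel_get]
      simp [hstA', hchr, hsel_get]
    have hB : bFor msg C.n (PySem.Int.mod C.dir C.n) (k :: ks) (C.rem, ((C.cLt tc % C.rem.length : Nat):Int), first, fin)
        = if C.rem.eraseIdx jN = [] then stB' else bFor msg C.n (PySem.Int.mod C.dir C.n) ks stB' := by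
      rw [bFor, hjval, hpop]
      simp only [hstB', hpE, hchr_b]
    have hlen' : (C.rem.eraseIdx jN).length = C.rem.length - 1 := by
      simp [List.length_eraseIdx, hjlen]
    have hrel' : pvRelS C' stA' stB' := by
      refine ⟨rfl, rfl, rfl, ?_, tc', htcb.1, htcb.2, rfl, ?_, ?_⟩
      · show (C.rem.eraseIdx jN).length + (fin ++ [chr]).length = C.N
        simp [hlen']
        omega
      · show (false = true ↔ tc' ∈ C.rem.eraseIdx jN)
        simp only [Bool.false_eq_true, false_iff]
        rw [pv_erase_mem C I hjlen]
        simp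
        exact fun _ => htc'
      · show pE = (((C.rem.eraseIdx jN).countP (fun r => decide (r < tc')) % (C.rem.eraseIdx jN).length : Nat) : Int)
        rw [pv_erase_countP C I hjlen, hlen', hpE]
        rcases Nat.lt_or_ge 1 C.rem.length with h2 | h2
        · rw [if_pos (by omega)]
          rw [pv_mod_emod _ _ (by omega : (0:Int) < (C.rem.length:Int) - 1)]
          have hcast : ((C.rem.length:Int)) - 1 = ((C.rem.length - 1 : Nat) : Int) := by omega
          rw [hcast, pv_intmod_cast]
        · have hl1 : C.rem.length = 1 := by omega
          have hj0 : jN = 0 := by omega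
          rw [if_neg (by omega), hj0, hl1]
          simp
    have hbreak : (((fin.length + 1 : Nat) : Int) = C.n) ↔ C.rem.eraseIdx jN = [] := by
      rw [List.length_eq_zero_iff.symm, hlen']
      unfold PvC.n
      omega
    rw [hA, hB]
    by_cases hstop : C.rem.eraseIdx jN = []
    · rw [if_pos (hbreak.2 hstop), if_pos hstop]
      exact ⟨C', rfl, rfl, I', hrel'⟩
    · rw [if_neg (fun h => hstop (hbreak.1 h)), if_neg hstop]
      obtain ⟨C'', h1, h2, I'', rel''⟩ := ih C' I' hstop stA' stB' hrel'
      exact ⟨C'', h1, h2, I'', rel''⟩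

-- the aligned outer while loops agree step by step
lemma pv_out (msg : List Char) (keys : List Int) :
    ∀ (fuel : Nat) (C : PvC), PvI C → ∀ stA stB, pvRelS C stA stB →
      (aOut msg C.n C.dir keys fuel stA).1
        = (bOut msg C.n (PySem.Int.mod C.dir C.n) keys fuel stB).2.2.2 := by
  intro fuel
  induction fuel with
  | zero =>
    intro C I stA stB hrel
    exact hrel.2.2.1
  | succ f ih =>
    intro C I stA stB hrel
    have hrel0 := hrel
    obtain ⟨hused, hrem, hfo, hlen, tc, -⟩ := hrel0
    have hmd := pv_m_def C
    rw [aOut, bOut]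
    by_cases hne : C.rem = []
    · -- both guards fail
      have hguardA : ¬ ((stA.1.length : Int) < C.n) := by
        have hm0 : C.m = 0 := by rw [hmd, hne]; rfl
        unfold PvC.n
        omega
      rw [if_neg hguardA, if_neg (by rw [hrem]; simpa using hne)]
      exact hfo
    · have hm := pv_m_pos C hne
      have hguardA : (stA.1.length : Int) < C.n := by
        unfold PvC.n
        omega
      rw [if_pos hguardA, if_pos (by rw [hrem]; simpa using hne)]
      obtain ⟨C', h1, h2, I', rel'⟩ := pv_for msg keys C I hne stA stB hrel
      have := ih C' I' _ _ rel'
      have hn' : C'.n = C.n := by unfold PvC.n; rw [h1]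
      rw [hn', h2] at this
      exact this

-- initial invariant and relation, and assembly of the final theorem
lemma pv_init_inv (N : Nat) (direction : Int) (hN : 0 < N)
    (hgcd : Int.gcd direction (N : Int) = 1) :
    PvI ⟨N, direction, PySem.List.pyRange 0 (N:Int) 1, PySem.Set.empty⟩ := by
  refine ⟨hN, hgcd, PySem.List.pairwise_lt_pyRange_one .., ?_, ?_⟩
  · intro t ht
    have := (PySem.List.mem_pyRange_one).1 ht
    exact ⟨this.1, this.2⟩
  · intro t ht0 ht1
    have hmem : t ∈ PySem.List.pyRange 0 (N:Int) 1 :=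
      (PySem.List.mem_pyRange_one).2 ⟨ht0, ht1⟩
    constructor
    · intro hc
      rw [PySem.Set.contains_iff _ _] at hc
      simp [PySem.Set.empty] at hc
    · intro hniff
      exact absurd hmem hniff

lemma pv_init_rel (N : Nat) (direction : Int) (hN : 0 < N) :
    pvRelS ⟨N, direction, PySem.List.pyRange 0 (N:Int) 1, PySem.Set.empty⟩
      ([], PySem.Set.empty, 0) (PySem.List.pyRange 0 (N:Int) 1, 0, true, []) := by
  refine ⟨rfl, rfl, rfl, ?_, 0, le_rfl, (by show (0:Int) < ((N:Nat):Int); exact_mod_cast hN), ?_, ?_, ?_⟩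
  · show (PySem.List.pyRange 0 (N:Int) 1).length + ([] : List Char).length = N
    rw [PySem.List.length_pyRange_one]
    simp
  · show (0:Int) = 0 * ((direction % (N:Int))) % (N:Int)
    simp
  · show (true = true ↔ (0:Int) ∈ PySem.List.pyRange 0 (N:Int) 1)
    simp only [true_iff]
    exact (PySem.List.mem_pyRange_one).2 ⟨le_rfl, by exact_mod_cast hN⟩
  · show (0:Int) = (((PySem.List.pyRange 0 (N:Int) 1).countP (fun r => decide (r < 0))
        % (PySem.List.pyRange 0 (N:Int) 1).length : Nat) : Int)
    have hc0 : (PySem.List.pyRange 0 (N:Int) 1).countP (fun r => decide (r < 0)) = 0 := by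
      rw [List.countP_eq_zero]
      intro a ha
      have := (PySem.List.mem_pyRange_one).1 ha
      simp
      omega
    rw [hc0]
    simp

-- ===== VERDICT (by name: the statement is the Claim_ definition above) =====
theorem custom_cipher_spec : Claim_equal_custom_cipher := by
  intro message keys direction hdom hpre
  unfold Spec_custom_cipher custom_cipher custom_cipher_alt
  dsimp only
  have hlen : message.length = message.toList.length := String.length_toList.symm
  by_cases h0 : message.toList.length = 0
  · rw [h0]
    simp [aOut]
  · have hN : 0 < message.toList.length := by omega
    have hkeys : keys ≠ [] ∧ Int.gcd direction (message.length : Int) = 1 := by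
      rcases hpre with h | h
      · omega
      · exact h
    have hgcd : Int.gcd direction ((message.toList.length : Nat) : Int) = 1 := by
      rw [← hlen]; exact hkeys.2
    have I0 := pv_init_inv (message.toList.length) direction hN hgcd
    have rel0 := pv_init_rel (message.toList.length) direction hN
    have hmain := pv_out message.toList keys (message.toList.length + 1) _ I0 _ _ rel0
    rw [if_neg (by exact_mod_cast h0)]
    exact congrArg String.ofList hmain
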